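-- pv_equiv track=rewrite | github.com/mfx2/CS1110 | Labs/lab13/lab13.py | minpos2
-- ===== SOURCE A (Python) =====
-- def minpos2(b,h,k):
--     """Returns: the POSITION of the minimum value of the list b[h..k]
--
--     This function does NOT modify the list b.
--
--     Parameter b: The list to search for the minimum
--     Precondition: b is a list of integers
--
--     Parameter h: The place to start in the list
--     Precondition: h is an int in 0..len(b)-1, h <= k
--
--     Parameter k: The place to finish in the list
--     Precondition: k is an int in 0..len(b)-1, h <= k
--     """
--     # PUT THE INITIALIZATION CODE HERE
--     r = h
--     small = b[r]
--     result = r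
--
--     # inv: b[x] is minimum of b[h..r-1]
--     # PUT THE WHILE LOOP HERE
--     while r != k+1:
--         if b[r] < small:
--             small = b[r]
--             result = r
--             r = r + 1
--         else:
--             r = r + 1
--     # post: b[x] is minimum of b[h..k]
--     # PUT THE RETURN STATEMENT HERE
--     return result
-- ===== SOURCE B (Python) =====
-- def minpos2(b, h, k):
--     # Divide and conquer: split [h..k] at the midpoint, find the position of the
--     # minimum in each half recursively, and keep the leftmost on ties (<=),
--     # which matches the first-occurrence rule of a left-to-right scan.
--     if h == k:
--         return h
--     m = (h + k) // 2
--     i = minpos2(b, h, m)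
--     j = minpos2(b, m + 1, k)
--     return i if b[i] <= b[j] else j
-- ===== Notes on version B (the rewrite author's own statement) =====
-- stated objective: alternative
-- what changed: Replaces A's single left-to-right scan with mutable running minimum/position by a divide-and-conquer recursion: split the range at the midpoint, recurse on each half, and combine with a leftmost-on-ties comparison.
-- outside the precondition, e.g. on minpos2([5, 3], 1, 0): A returns 1, B raises RecursionError
import Mathlib
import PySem

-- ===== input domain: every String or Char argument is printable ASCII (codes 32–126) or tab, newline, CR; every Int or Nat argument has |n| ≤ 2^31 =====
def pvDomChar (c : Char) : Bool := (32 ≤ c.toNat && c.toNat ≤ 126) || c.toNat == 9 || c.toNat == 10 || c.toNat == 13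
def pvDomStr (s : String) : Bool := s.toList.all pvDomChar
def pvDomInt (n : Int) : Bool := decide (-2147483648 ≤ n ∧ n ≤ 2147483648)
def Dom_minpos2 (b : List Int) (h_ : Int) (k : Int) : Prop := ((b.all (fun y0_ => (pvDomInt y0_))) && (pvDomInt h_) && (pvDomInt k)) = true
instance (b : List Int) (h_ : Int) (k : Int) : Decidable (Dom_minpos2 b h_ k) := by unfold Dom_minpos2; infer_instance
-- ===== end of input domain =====

-- B replaces A's single left-to-right scan (mutable running minimum and position) by a
-- divide-and-conquer recursion on the index range, combining halves with a
-- leftmost-on-ties comparison; neither version mutates b.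

-- ===== PORT A =====
-- the while loop: state (r, small, result); fuel bounds the iteration count, the
-- loop itself stops on Python's own condition r == k+1
def minpos2Loop (b : List Int) (k : Int) : Nat → Int → Int → Int → Int
  | 0, _, _, result => result
  | fuel + 1, r, small, result =>
    if r = k + 1 then result
    else
      let v := (PySem.List.pyGet? b r).getD 0   -- b[r]; Pre_ keeps the index in range
      if v < small then minpos2Loop b k fuel (r + 1) v r
      else minpos2Loop b k fuel (r + 1) small result

def minpos2 (b : List Int) (h_ : Int) (k : Int) : Int :=
  let r := h_
  let small := (PySem.List.pyGet? b r).getD 0   -- b[r]; Pre_ keeps the index in range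
  let result := r
  minpos2Loop b k ((k + 1 - r).toNat + 1) r small result

-- ===== PORT B =====
-- Source B's recursion, with fuel bounding the recursion depth (each subrange is strictly
-- shorter, so fuel (k-h).toNat+1 is never exhausted); the guard 'k ≤ h_' (instead of
-- Python's 'h == k') only makes the recursion total: for h > k the Python recursion
-- never terminates (RecursionError), and such inputs are outside Pre_.
def minpos2AltGo (b : List Int) : Nat → Int → Int → Int
  | 0, h_, _ => h_
  | fuel + 1, h_, k =>
    if k ≤ h_ then h_
    else
      let m := PySem.Int.floordiv (h_ + k) 2
      let i := minpos2AltGo b fuel h_ m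
      let j := minpos2AltGo b fuel (m + 1) k
      if (PySem.List.pyGet? b i).getD 0 ≤ (PySem.List.pyGet? b j).getD 0 then i else j

def minpos2_alt (b : List Int) (h_ : Int) (k : Int) : Int :=
  minpos2AltGo b ((k - h_).toNat + 1) h_ k

-- ===== PRECONDITION & SPEC =====
-- Pre_ is the documented domain: h and k are (possibly negative) in-range Python
-- indices with h <= k. The only excluded inputs on which A still returns are k = h-1
-- with h a valid index, where A returns h for an empty range while B's recursion
-- does not terminate (RecursionError).
def Pre_minpos2 (b : List Int) (h_ : Int) (k : Int) : Prop :=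
  -(b.length : Int) ≤ h_ ∧ h_ ≤ k ∧ k < b.length
instance (b : List Int) (h_ : Int) (k : Int) : Decidable (Pre_minpos2 b h_ k) := by
  unfold Pre_minpos2; infer_instance

def pvWitness_minpos2 : List Int × Int × Int := ([3, 1, 2], 0, 2)

def Spec_minpos2 (b : List Int) (h_ : Int) (k : Int) (out : Int) : Prop := out = minpos2_alt b h_ k
instance (b : List Int) (h_ : Int) (k : Int) (out : Int) : Decidable (Spec_minpos2 b h_ k out) := by unfold Spec_minpos2; infer_instance

-- ===== CLAIM (what is proved, stated in full; the proofs are below) =====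
def Claim_equal_minpos2 : Prop := ∀ (b : List Int) (h_ : Int) (k : Int), Dom_minpos2 b h_ k → Pre_minpos2 b h_ k → Spec_minpos2 b h_ k (minpos2 b h_ k)

-- ===== LEMMAS AND PROOFS =====

-- the value Python reads at position j (proof-side abbreviation)
def gAt (b : List Int) (j : Int) : Int := (PySem.List.pyGet? b j).getD 0

-- i is the FIRST position of the minimum of b[h..k]
def FirstMin (b : List Int) (h_ k i : Int) : Prop :=
  h_ ≤ i ∧ i ≤ k ∧ (∀ j, h_ ≤ j → j ≤ k → gAt b i ≤ gAt b j) ∧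
    (∀ j, h_ ≤ j → j < i → gAt b i < gAt b j)

theorem firstMin_unique {b : List Int} {h_ k i i' : Int}
    (hi : FirstMin b h_ k i) (hi' : FirstMin b h_ k i') : i = i' := by
  obtain ⟨hl, hr, hmin, hstr⟩ := hi
  obtain ⟨hl', hr', hmin', hstr'⟩ := hi'
  rcases lt_trichotomy i i' with h | h | h
  · exact absurd (hmin i' hl' hr') (not_le_of_gt (hstr' i hl h))
  · exact h
  · exact absurd (hmin' i hl hr) (not_le_of_gt (hstr i' hl' h))

theorem firstMin_self (b : List Int) (i : Int) : FirstMin b i i i := by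
  refine ⟨le_refl _, le_refl _, ?_, ?_⟩
  · intro j hj hj'; have : j = i := le_antisymm hj' hj; simp [this]
  · intro j hj hj'; omega

-- A's loop maintains: result is the first-min position of b[h..r-1]
theorem loop_firstMin (b : List Int) (h_ k : Int) :
    ∀ (fuel : Nat) (r result : Int), (k + 1 - r).toNat < fuel → r ≤ k + 1 →
      h_ ≤ result → result < r → FirstMin b h_ (r - 1) result →
      FirstMin b h_ k (minpos2Loop b k fuel r (gAt b result) result) := by
  intro fuel
  induction fuel with
  | zero => intro r result hfuel _ _ _ _; omega
  | succ f ih =>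
    intro r result hfuel hrk hhres hresr hFM
    by_cases hr : r = k + 1
    · simpa [minpos2Loop, hr] using (by rw [hr] at hFM; simpa using hFM)
    · have hlt : r < k + 1 := lt_of_le_of_ne hrk hr
      obtain ⟨h1, h2, hmin, hstr⟩ := hFM
      simp only [minpos2Loop, if_neg hr]
      by_cases hv : (PySem.List.pyGet? b r).getD 0 < gAt b result
      · rw [if_pos hv]
        have : (PySem.List.pyGet? b r).getD 0 = gAt b r := rfl
        rw [this]
        have hv' : gAt b r < gAt b result := hv
        apply ih (r + 1) r (by omega) (by omega) (by omega) (by omega)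
        refine ⟨by omega, by omega, ?_, ?_⟩
        · intro j hj hj'
          rcases lt_or_ge j r with hc | hc
          · exact le_of_lt (lt_of_lt_of_le hv' (hmin j hj (by omega)))
          · have : j = r := by omega
            simp [this]
        · intro j hj hj'
          exact lt_of_lt_of_le hv' (hmin j hj (by omega))
      · rw [if_neg hv]
        apply ih (r + 1) result (by omega) (by omega) hhres (by omega)
        refine ⟨h1, by omega, ?_, hstr⟩
        intro j hj hj'
        rcases lt_or_ge j r with hc | hc
        · exact hmin j hj (by omega)
        · have : j = r := by omega
          subst this
          exact le_of_not_gt (by simpa [gAt] using hv)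

-- B's recursion returns the first-min position of b[h..k]
theorem altGo_firstMin (b : List Int) :
    ∀ (fuel : Nat) (h_ k : Int), (k - h_).toNat < fuel → h_ ≤ k →
      FirstMin b h_ k (minpos2AltGo b fuel h_ k) := by
  intro fuel
  induction fuel with
  | zero => intro h_ k hn hhk; omega
  | succ f ih =>
    intro h_ k hn hhk
    rcases eq_or_lt_of_le hhk with he | hlt
    · subst he
      simp only [minpos2AltGo, if_pos (le_refl h_)]
      exact firstMin_self b h_
    · simp only [minpos2AltGo, if_neg (by omega : ¬ k ≤ h_)]
      have hm : PySem.Int.floordiv (h_ + k) 2 = (h_ + k) / 2 :=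
        PySem.Int.floordiv_eq_ediv_of_pos (by omega)
      set m := PySem.Int.floordiv (h_ + k) 2 with hmdef
      have hm1 : h_ ≤ m := by omega
      have hm2 : m < k := by omega
      have hi := ih h_ m (by omega) hm1
      have hj := ih (m + 1) k (by omega) (by omega)
      obtain ⟨hil, hir, himin, histr⟩ := hi
      obtain ⟨hjl, hjr, hjmin, hjstr⟩ := hj
      set i := minpos2AltGo b f h_ m
      set j := minpos2AltGo b f (m + 1) k
      by_cases hc : (PySem.List.pyGet? b i).getD 0 ≤ (PySem.List.pyGet? b j).getD 0
      · rw [if_pos hc]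
        have hc' : gAt b i ≤ gAt b j := hc
        refine ⟨hil, by omega, ?_, ?_⟩
        · intro t ht ht'
          rcases le_or_gt t m with hcase | hcase
          · exact himin t ht hcase
          · exact le_trans hc' (hjmin t (by omega) ht')
        · intro t ht ht'
          exact histr t ht ht'
      · rw [if_neg hc]
        have hc' : gAt b j < gAt b i := lt_of_not_ge hc
        refine ⟨by omega, hjr, ?_, ?_⟩
        · intro t ht ht'
          rcases le_or_gt t m with hcase | hcase
          · exact le_trans (le_of_lt hc') (himin t ht hcase)
          · exact hjmin t (by omega) ht'
        · intro t ht ht'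
          rcases le_or_gt t m with hcase | hcase
          · exact lt_of_lt_of_le hc' (himin t ht hcase)
          · exact hjstr t (by omega) ht'

theorem minpos2_firstMin (b : List Int) (h_ k : Int) (hhk : h_ ≤ k) :
    FirstMin b h_ k (minpos2 b h_ k) := by
  unfold minpos2
  show FirstMin b h_ k
    (minpos2Loop b k ((k + 1 - h_).toNat + 1) h_ ((PySem.List.pyGet? b h_).getD 0) h_)
  have hfuel : (k + 1 - h_).toNat + 1 = (k + 1 - (h_ + 1)).toNat + 1 + 1 := by omega
  rw [hfuel]
  have hne : ¬ h_ = k + 1 := by omega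
  have hnv : ¬ (PySem.List.pyGet? b h_).getD 0 < (PySem.List.pyGet? b h_).getD 0 := lt_irrefl _
  simp only [minpos2Loop, if_neg hne, if_neg hnv]
  have := loop_firstMin b h_ k ((k + 1 - (h_ + 1)).toNat + 1) (h_ + 1) h_
    (by omega) (by omega) (le_refl _) (by omega)
    (by simpa using firstMin_self b h_)
  exact this

-- ===== VERDICT (by name: the statement is the Claim_ definition above) =====
theorem minpos2_spec : Claim_equal_minpos2 := by
  intro b h_ k _ hpre
  obtain ⟨_, hhk, _⟩ := hpre
  unfold Spec_minpos2 minpos2_alt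
  exact firstMin_unique (minpos2_firstMin b h_ k hhk)
    (altGo_firstMin b ((k - h_).toNat + 1) h_ k (by omega) hhk)
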